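-- pv_equiv track=rewrite | github.com/Shijinzakaue/SRDL | SRDL/SRDL.py | parse_m3u8_url
-- ===== SOURCE A (Python) =====
-- def parse_m3u8_url(streaming_url_list):
--     for item in streaming_url_list:
--         if item.get('type') == 'hls' and 'ss.m3u8' in item.get('url', ''):
--             return item['url']
--     for item in streaming_url_list:
--         if item.get('type') == 'hls':
--             return item['url']
--     return None
-- ===== SOURCE B (Python) =====
-- def parse_m3u8_url(streaming_url_list):
--     fallback = None
--     for item in streaming_url_list:
--         if item.get('type') == 'hls':
--             if 'ss.m3u8' in item.get('url', ''):
--                 return item['url']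
--             if fallback is None:
--                 fallback = item
--     return fallback['url'] if fallback is not None else None
-- ===== Notes on version B (the rewrite author's own statement) =====
-- stated objective: simpler
-- what changed: A's two sequential scans over the list are collapsed into one pass that remembers the first plain hls item as a fallback and returns immediately on an ss.m3u8 match.
import Mathlib
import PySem

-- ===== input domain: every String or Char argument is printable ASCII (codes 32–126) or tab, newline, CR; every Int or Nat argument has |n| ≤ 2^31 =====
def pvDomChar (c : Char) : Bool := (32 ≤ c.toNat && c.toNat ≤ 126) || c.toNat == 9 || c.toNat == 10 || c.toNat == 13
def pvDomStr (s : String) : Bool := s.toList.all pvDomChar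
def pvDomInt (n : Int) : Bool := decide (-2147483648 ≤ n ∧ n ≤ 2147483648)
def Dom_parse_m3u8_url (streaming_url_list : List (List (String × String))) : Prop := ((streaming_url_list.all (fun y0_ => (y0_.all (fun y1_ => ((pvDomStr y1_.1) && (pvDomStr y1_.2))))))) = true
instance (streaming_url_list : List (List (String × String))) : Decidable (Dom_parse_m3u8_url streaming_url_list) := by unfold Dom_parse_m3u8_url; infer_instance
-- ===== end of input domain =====

-- B collapses A's two sequential scans into one pass with a remembered fallback item (simpler).
-- Pre_ excludes only inputs on which both Pythons raise KeyError (an hls item without 'url' being returned).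


-- ===== PORT A =====
-- item.get(k) : first-match lookup in the association list (Python dict lookup)
def pvGet (item : List (String × String)) (k : String) : Option String :=
  (item.find? (fun p => p.1 == k)).map (·.2)

-- first loop of A: return item['url'] on an hls item whose url contains 'ss.m3u8'
def pvApass1 : List (List (String × String)) → Option String
  | [] => none
  | item :: rest =>
    if pvGet item "type" = some "hls" ∧ PySem.Str.isIn "ss.m3u8" ((pvGet item "url").getD "") = true
    then some ((pvGet item "url").getD "")   -- item['url']; key present under Pre_
    else pvApass1 rest

-- second loop of A: return item['url'] on the first hls item
def pvApass2 : List (List (String × String)) → Option String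
  | [] => none
  | item :: rest =>
    if pvGet item "type" = some "hls"
    then some ((pvGet item "url").getD "")   -- item['url']; key present under Pre_
    else pvApass2 rest

def parse_m3u8_url (streaming_url_list : List (List (String × String))) : Option String :=
  match pvApass1 streaming_url_list with
  | some s => some s
  | none => pvApass2 streaming_url_list

-- ===== PORT B =====
-- single pass with a remembered fallback item
def pvBloop : List (List (String × String)) → Option (List (String × String)) → Option String
  | [], fb =>
    match fb with
    | some d => some ((pvGet d "url").getD "")   -- fallback['url']; key present under Pre_
    | none => none
  | item :: rest, fb =>
    if pvGet item "type" = some "hls" then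
      if PySem.Str.isIn "ss.m3u8" ((pvGet item "url").getD "") = true
      then some ((pvGet item "url").getD "")
      else pvBloop rest (if fb.isNone then some item else fb)
    else pvBloop rest fb

def parse_m3u8_url_alt (streaming_url_list : List (List (String × String))) : Option String :=
  pvBloop streaming_url_list none

-- ===== PRECONDITION & SPEC =====
def pvIsSS (item : List (String × String)) : Bool :=
  (pvGet item "type" == some "hls") && PySem.Str.isIn "ss.m3u8" ((pvGet item "url").getD "")
def pvIsHls (item : List (String × String)) : Bool :=
  pvGet item "type" == some "hls"

-- Pre_ excludes exactly the inputs where both Pythons raise KeyError: no hls item's url contains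
-- 'ss.m3u8' and the first hls item has no 'url' key (its item['url'] is evaluated and raises).
def Pre_parse_m3u8_url (streaming_url_list : List (List (String × String))) : Prop :=
  streaming_url_list.find? pvIsSS = none →
    ∀ d, streaming_url_list.find? pvIsHls = some d → (pvGet d "url").isSome = true
instance (streaming_url_list : List (List (String × String))) : Decidable (Pre_parse_m3u8_url streaming_url_list) := by unfold Pre_parse_m3u8_url; infer_instance

def pvWitness_parse_m3u8_url : (List (List (String × String))) :=
  [[("type", "hls"), ("url", "http://a/ss.m3u8")], [("type", "dash"), ("url", "http://b")]]

def Spec_parse_m3u8_url (streaming_url_list : List (List (String × String))) (out : Option String) : Prop := out = parse_m3u8_url_alt streaming_url_list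
instance (streaming_url_list : List (List (String × String))) (out : Option String) : Decidable (Spec_parse_m3u8_url streaming_url_list out) := by unfold Spec_parse_m3u8_url; infer_instance

-- ===== CLAIM (what is proved, stated in full; the proofs are below) =====
def Claim_equal_parse_m3u8_url : Prop := ∀ (streaming_url_list : List (List (String × String))), Dom_parse_m3u8_url streaming_url_list → Pre_parse_m3u8_url streaming_url_list → Spec_parse_m3u8_url streaming_url_list (parse_m3u8_url streaming_url_list)

-- ===== LEMMAS AND PROOFS =====
-- Loop invariant: B's single pass equals A's first pass, falling back (in order) to the
-- remembered item and then to A's second pass.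
theorem pvBloop_eq (l : List (List (String × String))) :
    ∀ fb, pvBloop l fb =
      match pvApass1 l with
      | some s => some s
      | none =>
        match fb with
        | some d => some ((pvGet d "url").getD "")
        | none => pvApass2 l := by
  induction l with
  | nil => intro fb; cases fb <;> simp [pvBloop, pvApass1, pvApass2]
  | cons item rest ih =>
    intro fb
    by_cases hT : pvGet item "type" = some "hls"
    · by_cases hS : PySem.Chars.isIn ['s','s','.','m','3','u','8'] ((pvGet item "url").getD "").toList = true
      · simp [pvBloop, pvApass1, hT, hS]
      · cases fb <;>
          simp [pvBloop, pvApass1, pvApass2, hT, hS, ih]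
    · cases fb <;>
        simp [pvBloop, pvApass1, pvApass2, hT, ih]

-- ===== VERDICT (by name: the statement is the Claim_ definition above) =====
theorem parse_m3u8_url_spec : Claim_equal_parse_m3u8_url := by
  intro l _ _
  show parse_m3u8_url l = parse_m3u8_url_alt l
  rw [parse_m3u8_url_alt, pvBloop_eq l none, parse_m3u8_url]
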